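-- pv_equiv track=rewrite | github.com/MissWangxiating/pythonStudyGroup | task2/task2-2.py | pull_author
-- ===== SOURCE A (Python) =====
-- def pull_author(rows_list):
--     author_dic={}
--     for row in rows_list:
--         paper_id = row[0]
--         paper_name = row[1]
--         paper_author = row[2]
--         paper_key = paper_id + "\t" + paper_name
--
--         if paper_key in author_dic.keys():
--             author_dic[paper_key] = author_dic[paper_key] +";" +paper_author
--         else:
--             author_dic[paper_key] = paper_author
--     return author_dic
-- ===== SOURCE B (Python) =====
-- def pull_author(rows_list):
--     keys = []
--     for row in rows_list:
--         key = row[0] + "\t" + row[1]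
--         if key not in keys:
--             keys.append(key)
--     return {key: ";".join(row[2] for row in rows_list
--                           if row[0] + "\t" + row[1] == key)
--             for key in keys}
-- ===== Notes on version B (the rewrite author's own statement) =====
-- stated objective: alternative
-- what changed: B abandons the accumulating dict entirely: it first discovers the distinct keys in encounter order in a plain list, then for each key rescans the whole input to join that key's authors, so the result is computed by per-key nested scans instead of A's single-pass dict of growing strings.
import Mathlib
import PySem

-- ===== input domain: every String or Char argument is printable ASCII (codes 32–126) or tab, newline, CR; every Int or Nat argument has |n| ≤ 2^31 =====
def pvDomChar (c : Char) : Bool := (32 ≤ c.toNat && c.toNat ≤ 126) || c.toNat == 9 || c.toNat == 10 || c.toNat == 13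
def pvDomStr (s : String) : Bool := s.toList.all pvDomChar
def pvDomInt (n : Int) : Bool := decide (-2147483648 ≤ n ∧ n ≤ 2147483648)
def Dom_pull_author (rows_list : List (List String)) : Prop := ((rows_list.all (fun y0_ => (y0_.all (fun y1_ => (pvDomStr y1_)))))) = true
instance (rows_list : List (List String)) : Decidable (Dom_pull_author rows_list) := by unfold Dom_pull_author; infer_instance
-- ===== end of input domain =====

-- B drops A's accumulating dict: it first collects the distinct keys in encounter
-- order into a plain list, then rescans the whole input once per key and joins
-- that key's authors with ';' (alternative nested-scan decomposition, not faster).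

-- ===== PORT A =====
-- literal transliteration of Source A: one dict of strings, grown by string concatenation
def pull_author (rows_list : List (List String)) : List (String × String) :=
  (rows_list.foldl (fun author_dic row =>
    match PySem.List.pyGet? row 0, PySem.List.pyGet? row 1, PySem.List.pyGet? row 2 with
    | some paper_id, some paper_name, some paper_author =>
        let paper_key := paper_id ++ "\t" ++ paper_name
        match author_dic.get? paper_key with
        | some prev => author_dic.insert paper_key (prev ++ ";" ++ paper_author)
        | none => author_dic.insert paper_key paper_author
    | _, _, _ => author_dic  -- row[i] raises IndexError in Python; excluded by Pre_
    ) PySem.Dict.empty).items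

-- ===== PORT B =====
-- literal transliteration of Source B: the keys-discovery loop, then the dict
-- comprehension: for each key, join of the generator filtering rows by key.
-- (In the generator Python reads row[0], row[1] before row[2]; under Pre_ all
-- three exist, and on a too-short row the whole generator raises — outside Pre_.)
def pull_author_alt (rows_list : List (List String)) : List (String × String) :=
  let keys := rows_list.foldl (fun keys row =>
    match PySem.List.pyGet? row 0 with
    | none => keys  -- row[0] raises IndexError in Python; excluded by Pre_
    | some r0 =>
      match PySem.List.pyGet? row 1 with
      | none => keys
      | some r1 =>
        let key := r0 ++ "\t" ++ r1
        if keys.contains key then keys else keys ++ [key]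
    ) []
  keys.map (fun key => (key, PySem.Str.join ";" (rows_list.filterMap (fun row =>
    (PySem.List.pyGet? row 0).bind (fun r0 =>
      (PySem.List.pyGet? row 1).bind (fun r1 =>
        (PySem.List.pyGet? row 2).bind (fun r2 =>
          if r0 ++ "\t" ++ r1 == key then some r2 else none)))))))

-- ===== PRECONDITION & SPEC =====
-- Pre_ excludes exactly the inputs containing a row with fewer than 3 entries,
-- on which the Python A raises IndexError.
def Pre_pull_author (rows_list : List (List String)) : Prop :=
  ∀ row ∈ rows_list, 3 ≤ row.length
instance (rows_list : List (List String)) : Decidable (Pre_pull_author rows_list) := by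
  unfold Pre_pull_author; infer_instance
def pvWitness_pull_author : List (List String) :=
  [["1", "paperA", "alice"], ["1", "paperA", "bob"], ["2", "paperB", "carol"]]
def Spec_pull_author (rows_list : List (List String)) (out : List (String × String)) : Prop := out = pull_author_alt rows_list
instance (rows_list : List (List String)) (out : List (String × String)) : Decidable (Spec_pull_author rows_list out) := by unfold Spec_pull_author; infer_instance

-- ===== CLAIM (what is proved, stated in full; the proofs are below) =====
def Claim_equal_pull_author : Prop := ∀ (rows_list : List (List String)), Dom_pull_author rows_list → Pre_pull_author rows_list → Spec_pull_author rows_list (pull_author rows_list)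

-- ===== LEMMAS AND PROOFS =====

-- abstract (key, author) view of a row that has at least 3 entries
def pvTrip (row : List String) : String × String :=
  match row with
  | r0 :: r1 :: r2 :: _ => (r0 ++ "\t" ++ r1, r2)
  | _ => ("", "")

-- A's loop body on the pair view
def pvStepA (d : PySem.Dict String String) (p : String × String) : PySem.Dict String String :=
  match d.get? p.1 with
  | some prev => d.insert p.1 (prev ++ ";" ++ p.2)
  | none => d.insert p.1 p.2

-- B's key-discovery and per-key collection on the pair view
def pvKeys (ps : List (String × String)) : List String :=
  ps.foldl (fun ks p => if ks.contains p.1 then ks else ks ++ [p.1]) []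

def pvCollect (ps : List (String × String)) (k : String) : List String :=
  ps.filterMap (fun p => if p.1 == k then some p.2 else none)

theorem pv_pyGet?_zero (a : String) (l : List String) :
    PySem.List.pyGet? (a :: l) 0 = some a := by
  simp [PySem.List.pyGet?, PySem.List.pyIdx?]

theorem pv_pyGet?_one (a b : String) (l : List String) :
    PySem.List.pyGet? (a :: b :: l) 1 = some b := by
  simp [PySem.List.pyGet?, PySem.List.pyIdx?]

theorem pv_pyGet?_two (a b c : String) (l : List String) :
    PySem.List.pyGet? (a :: b :: c :: l) 2 = some c := by
  simp [PySem.List.pyGet?, PySem.List.pyIdx?, show (2:Int) ≤ ↑l.length + 1 + 1 by omega]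

theorem pv_chars_join_append (sep v a : List Char) (vs : List (List Char)) :
    PySem.Chars.join sep (v :: vs ++ [a]) = PySem.Chars.join sep (v :: vs) ++ sep ++ a := by
  induction vs generalizing v with
  | nil => simp [PySem.Chars.join_cons_cons, PySem.Chars.join_singleton]
  | cons w ws ih =>
      simp only [List.cons_append] at ih ⊢
      rw [PySem.Chars.join_cons_cons, PySem.Chars.join_cons_cons, ih w]
      simp [List.append_assoc]

theorem pv_join_singleton (a : String) : PySem.Str.join ";" [a] = a := by
  apply String.toList_inj.mp
  simp [PySem.Str.toList_join, PySem.Chars.join_singleton]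

theorem pv_join_append (vs : List String) (a : String) (h : vs ≠ []) :
    PySem.Str.join ";" (vs ++ [a]) = PySem.Str.join ";" vs ++ ";" ++ a := by
  obtain ⟨v, vs', rfl⟩ := List.exists_cons_of_ne_nil h
  apply String.toList_inj.mp
  simp only [PySem.Str.toList_join, String.toList_append, List.map_append, List.map_cons,
    List.map_nil, List.cons_append]
  simpa using pv_chars_join_append ";".toList v.toList a.toList (vs'.map String.toList)

-- the key-discovery fold is a PySem.Set fold of the first components
theorem pv_mem_pvKeys (ps : List (String × String)) (k : String) :
    k ∈ pvKeys ps ↔ ∃ a, (k, a) ∈ ps := by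
  rw [pvKeys,
    show (fun (ks : List String) (p : String × String) =>
        if ks.contains p.1 then ks else ks ++ [p.1])
      = (fun ks p => PySem.Set.add ks p.1) from rfl,
    PySem.Set.mem_foldl_add]
  constructor
  · rintro (h | ⟨p, hp, rfl⟩)
    · simp at h
    · exact ⟨p.2, hp⟩
  · rintro ⟨a, ha⟩
    exact Or.inr ⟨(k, a), ha, rfl⟩

theorem pv_collect_ne_nil (ps : List (String × String)) (k : String) :
    pvCollect ps k ≠ [] ↔ ∃ a, (k, a) ∈ ps := by
  rw [pvCollect, Ne, List.filterMap_eq_nil_iff]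
  constructor
  · intro h
    by_contra hno
    apply h
    intro p hp
    by_cases hk : p.1 == k
    · have e : p.1 = k := by simpa using hk
      exact absurd ⟨p.2, by rw [← e]; simpa using hp⟩ hno
    · simp [hk]
  · rintro ⟨a, ha⟩ h
    have := h (k, a) ha
    simp at this

-- lookup in a dict whose items are keyed by a value-map over a key list
theorem pv_get?_of_items (d : PySem.Dict String String) (ks : List String) (v : String → String)
    (h : d.items = ks.map fun k => (k, v k)) (k : String) :
    d.get? k = if k ∈ ks then some (v k) else none := by
  cases d with
  | mk l =>
    subst h
    induction ks with
    | nil => simp [PySem.Dict.get?]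
    | cons k1 rest ih =>
        rw [List.map_cons, PySem.Dict.get?_mk_cons, ih]
        by_cases hk : k1 = k
        · subst hk
          simp
        · have hk' : ¬ k = k1 := fun h => hk h.symm
          simp [hk, hk']

-- the heart: A's fold over pairs yields exactly B's keys-then-collect table
theorem pv_foldA_items (ps : List (String × String)) :
    (ps.foldl pvStepA PySem.Dict.empty).items
      = (pvKeys ps).map (fun k => (k, PySem.Str.join ";" (pvCollect ps k))) := by
  induction ps using List.reverseRecOn with
  | nil => simp [pvKeys, pvCollect, PySem.Dict.empty]
  | append_singleton qs p ih =>
      rw [List.foldl_append, List.foldl_cons, List.foldl_nil]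
      have hkeys : pvKeys (qs ++ [p])
          = if (pvKeys qs).contains p.1 then pvKeys qs else pvKeys qs ++ [p.1] := by
        rw [pvKeys, List.foldl_append]; rfl
      have hcol : ∀ k, pvCollect (qs ++ [p]) k
          = pvCollect qs k ++ (if p.1 == k then [p.2] else []) := by
        intro k
        rw [pvCollect, List.filterMap_append, ← pvCollect]
        congr 1
        by_cases h : p.1 = k <;> simp [h]
      have hget := pv_get?_of_items _ _ _ ih p.1
      by_cases hmem : p.1 ∈ pvKeys qs
      · -- existing key: update in place
        have hcb : (pvKeys qs).contains p.1 = true := by simpa using hmem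
        have hg : (qs.foldl pvStepA PySem.Dict.empty).get? p.1
            = some (PySem.Str.join ";" (pvCollect qs p.1)) := by rw [hget, if_pos hmem]
        have hcd : (qs.foldl pvStepA PySem.Dict.empty).contains p.1 = true := by
          rw [PySem.Dict.contains_eq_isSome_get?, hg]; rfl
        rw [pvStepA, hg]
        rw [PySem.Dict.items_insert_of_contains _ _ hcd, ih, hkeys, if_pos hcb]
        rw [List.map_map]
        apply List.map_congr_left
        intro k hk
        by_cases hke : k == p.1
        · have hkeq : k = p.1 := by simpa using hke
          have hne : pvCollect qs p.1 ≠ [] :=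
            (pv_collect_ne_nil qs p.1).mpr ((pv_mem_pvKeys qs p.1).mp (hkeq ▸ hk))
          simp [Function.comp, hcol, hkeq, pv_join_append _ _ hne]
        · have hkeq : ¬ k = p.1 := by simpa using hke
          have hke' : (p.1 == k) = false :=
            beq_eq_false_iff_ne.mpr (fun h => hkeq h.symm)
          simp [Function.comp, hke, hcol, hke']
      · -- new key: append
        have hcb : (pvKeys qs).contains p.1 = false := by simpa using hmem
        have hg : (qs.foldl pvStepA PySem.Dict.empty).get? p.1 = none := by
          rw [hget, if_neg hmem]
        have hcd : (qs.foldl pvStepA PySem.Dict.empty).contains p.1 = false := by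
          rw [PySem.Dict.contains_eq_isSome_get?, hg]; rfl
        rw [pvStepA, hg]
        rw [PySem.Dict.items_insert_of_not_contains _ _ hcd, ih, hkeys,
          if_neg (by simpa using hmem)]
        rw [List.map_append]
        congr 1
        · apply List.map_congr_left
          intro k hk
          have hke' : (p.1 == k) = false :=
            beq_eq_false_iff_ne.mpr (fun h => hmem (h ▸ hk))
          simp [hcol, hke']
        · have hnil : pvCollect qs p.1 = [] := by
            by_contra h
            exact hmem ((pv_mem_pvKeys qs p.1).mpr ((pv_collect_ne_nil qs p.1).mp h))
          simp [hcol, hnil, pv_join_singleton]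

-- under Pre_, both ports reduce to the pair view
theorem pv_A_eq (rows : List (List String)) (h : ∀ row ∈ rows, 3 ≤ row.length)
    (d : PySem.Dict String String) :
    rows.foldl (fun author_dic row =>
      match PySem.List.pyGet? row 0, PySem.List.pyGet? row 1, PySem.List.pyGet? row 2 with
      | some paper_id, some paper_name, some paper_author =>
          let paper_key := paper_id ++ "\t" ++ paper_name
          match author_dic.get? paper_key with
          | some prev => author_dic.insert paper_key (prev ++ ";" ++ paper_author)
          | none => author_dic.insert paper_key paper_author
      | _, _, _ => author_dic) d
    = (rows.map pvTrip).foldl pvStepA d := by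
  induction rows generalizing d with
  | nil => rfl
  | cons row rest ih =>
      have hr := h row (List.mem_cons_self ..)
      match row, hr with
      | r0 :: r1 :: r2 :: rs, _ =>
        simp only [List.foldl_cons, List.map_cons]
        rw [ih (fun r hr => h r (List.mem_cons_of_mem _ hr))]
        congr 1
        rw [pv_pyGet?_zero, pv_pyGet?_one, pv_pyGet?_two]
        simp [pvStepA, pvTrip]

theorem pv_Bkeys_eq (rows : List (List String)) (h : ∀ row ∈ rows, 3 ≤ row.length)
    (acc : List String) :
    rows.foldl (fun keys row =>
      match PySem.List.pyGet? row 0 with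
      | none => keys
      | some r0 =>
        match PySem.List.pyGet? row 1 with
        | none => keys
        | some r1 =>
          let key := r0 ++ "\t" ++ r1
          if keys.contains key then keys else keys ++ [key]) acc
    = (rows.map pvTrip).foldl (fun ks p => if ks.contains p.1 then ks else ks ++ [p.1]) acc := by
  induction rows generalizing acc with
  | nil => rfl
  | cons row rest ih =>
      have hr := h row (List.mem_cons_self ..)
      match row, hr with
      | r0 :: r1 :: r2 :: rs, _ =>
        simp only [List.foldl_cons, List.map_cons]
        rw [ih (fun r hr => h r (List.mem_cons_of_mem _ hr))]
        congr 1
        rw [pv_pyGet?_zero, pv_pyGet?_one]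
        simp [pvTrip]

theorem pv_Bcollect_eq (rows : List (List String)) (h : ∀ row ∈ rows, 3 ≤ row.length)
    (k : String) :
    rows.filterMap (fun row =>
      (PySem.List.pyGet? row 0).bind (fun r0 =>
        (PySem.List.pyGet? row 1).bind (fun r1 =>
          (PySem.List.pyGet? row 2).bind (fun r2 =>
            if r0 ++ "\t" ++ r1 == k then some r2 else none))))
    = pvCollect (rows.map pvTrip) k := by
  induction rows with
  | nil => rfl
  | cons row rest ih =>
      have hr := h row (List.mem_cons_self ..)
      match row, hr with
      | r0 :: r1 :: r2 :: rs, _ =>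
        simp only [List.map_cons]
        rw [pvCollect, List.filterMap_cons, List.filterMap_cons,
          ← pvCollect, ← ih (fun r hr => h r (List.mem_cons_of_mem _ hr))]
        rw [pv_pyGet?_zero, pv_pyGet?_one, pv_pyGet?_two]
        simp [pvTrip]

-- ===== VERDICT (by name: the statement is the Claim_ definition above) =====
theorem pull_author_spec : Claim_equal_pull_author := by
  intro rows _ hpre
  unfold Spec_pull_author pull_author pull_author_alt
  rw [pv_A_eq rows hpre, pv_foldA_items, pv_Bkeys_eq rows hpre, ← pvKeys]
  apply List.map_congr_left
  intro k _
  rw [pv_Bcollect_eq rows hpre]
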